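-- pv_equiv track=rewrite | github.com/chiww/HotDog | server/parser.py | process
-- ===== SOURCE A (Python) =====
-- def process(cmd_stdout, *args, **kwargs):
--     """
--     获取进程信息
--
--     UID        PID  PPID  C STIME TTY          TIME CMD
--     root         1     0  0 04:27 ?        00:00:05 /usr/lib/systemd/systemd --switched-root --system --deserialize 21
--     root         2     0  0 04:27 ?        00:00:00 [kthreadd]
--     root       820     1  0 04:27 ?        00:00:00 /usr/sbin/gssproxy -D
--     rpc        823     1  0 04:27 ?        00:00:00 /sbin/rpcbind -w
--     dbus       829     1  0 04:27 ?        00:00:00 /usr/bin/dbus-daemon --system --address=systemd: --nofork --nopidfile --systemd-activation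
--     libstor+   835     1  0 04:27 ?        00:00:00 /usr/bin/lsmd -d
--     root       836     1  0 04:27 ?        00:00:00 /usr/sbin/smartd -n -q never
--
--     :param cmd_stdout:
--     :return:
--     """
--     fields = ['user', 'pid', 'ppid', 'c', 'stime', 'tty', 'time', 'cmd']
--
--     def row_parse(values, row):
--
--         # field num, except 'cmd' field.
--         n = 7
--
--         if len(values) == n:
--             values.append(row)
--             return
--
--         val, o_val = row.split(' ', 1)
--         if val:
--             values.append(val)
--
--         row_parse(values, o_val)
--
--     # 排除空字符串
--     if not cmd_stdout:
--         return None
--     proc = list()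
--
--     c = 0
--     for content in cmd_stdout.split('\n'):
--
--         if c == 0:
--             c += 1
--             continue
--
--         if not content:
--             continue
--
--         values = list()
--         row_parse(values, content)
--         tmp = dict(zip(fields, values))
--
--         proc.append(tmp)
--
--     return proc
-- ===== SOURCE B (Python) =====
-- def _row(line):
--     # Tokenize the line once, then collect the first 7 non-empty single-space
--     # tokens; the cmd field is the rest of the line re-joined.
--     parts = line.split(' ')
--     values = []
--     i = 0
--     while len(values) < 7:
--         p = parts[i]
--         if p:
--             values.append(p)
--         i += 1
--     values.append(' '.join(parts[i:]))
--     return values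
--
--
-- def process(cmd_stdout, *args, **kwargs):
--     fields = ['user', 'pid', 'ppid', 'c', 'stime', 'tty', 'time', 'cmd']
--     if not cmd_stdout:
--         return None
--     return [dict(zip(fields, _row(line)))
--             for line in cmd_stdout.split('\n')[1:] if line]
-- ===== Notes on version B (the rewrite author's own statement) =====
-- stated objective: simpler
-- what changed: The recursive row_parse that repeatedly re-splits the shrinking remainder with a single-space maxsplit-1 split is replaced by tokenizing each line once on single spaces, collecting the first 7 non-empty tokens by index, and re-joining the remaining parts as the cmd field; the outer loop becomes a list comprehension over lines[1:].
import Mathlib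
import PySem

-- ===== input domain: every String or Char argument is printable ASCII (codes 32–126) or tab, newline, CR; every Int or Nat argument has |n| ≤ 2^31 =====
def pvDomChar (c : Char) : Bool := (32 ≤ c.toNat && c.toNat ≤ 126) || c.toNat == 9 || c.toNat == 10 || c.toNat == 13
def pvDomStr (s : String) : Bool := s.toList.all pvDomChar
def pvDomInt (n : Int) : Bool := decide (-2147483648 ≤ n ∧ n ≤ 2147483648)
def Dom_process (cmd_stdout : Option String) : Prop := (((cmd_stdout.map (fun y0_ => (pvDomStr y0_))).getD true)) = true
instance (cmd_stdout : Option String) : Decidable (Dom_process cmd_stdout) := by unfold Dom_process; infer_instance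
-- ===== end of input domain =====

-- B replaces A's recursive row_parse (repeated single-space maxsplit-1 splits of the shrinking
-- remainder) by one single-space split per line, an index loop collecting the first 7 non-empty tokens, and a re-join of the
-- remaining parts as the cmd field; objective: simpler.

-- first single-space split of a line: some (before, after) if a space occurs, none otherwise
-- (proof-side characterisation; the A-port needs it only for its termination argument)
def pvFirstSplit : List Char → Option (List Char × List Char)
  | [] => none
  | c :: rest => if c = ' ' then some ([], rest) else (pvFirstSplit rest).map (fun pr => (c :: pr.1, pr.2))

theorem pvFirstSplit_length : ∀ (l p r : List Char), pvFirstSplit l = some (p, r) → r.length < l.length := by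
  intro l
  induction l with
  | nil => intro p r h; simp [pvFirstSplit] at h
  | cons c rest ih =>
    intro p r h
    by_cases hc : c = ' '
    · simp only [pvFirstSplit, if_pos hc, Option.some.injEq, Prod.mk.injEq] at h
      obtain ⟨hp, hr⟩ := h
      subst hr
      simp
    · simp only [pvFirstSplit, if_neg hc, Option.map_eq_some_iff] at h
      obtain ⟨⟨a, b⟩, hab, hpr⟩ := h
      cases hpr
      have := ih a b hab
      simp
      omega

theorem pvGo0 : ∀ (fuel : Nat) (l cur : List Char) (acc : List (List Char)), l.length ≤ fuel →
    PySem.Chars.splitOnMax.go [' '] fuel 0 l cur acc = acc.reverse ++ [cur.reverse ++ l] := by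
  intro fuel
  induction fuel with
  | zero => intro l cur acc h; simp at h; subst h; simp [PySem.Chars.splitOnMax.go]
  | succ n ih =>
    intro l cur acc h
    cases l with
    | nil => simp [PySem.Chars.splitOnMax.go]
    | cons c rest => simp [PySem.Chars.splitOnMax.go]

theorem pvGo1 : ∀ (fuel : Nat) (l cur : List Char) (acc : List (List Char)), l.length ≤ fuel →
    PySem.Chars.splitOnMax.go [' '] fuel 1 l cur acc = acc.reverse ++
      (match pvFirstSplit l with
       | none => [cur.reverse ++ l]
       | some (p, r) => [cur.reverse ++ p, r]) := by
  intro fuel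
  induction fuel with
  | zero => intro l cur acc h; simp at h; subst h; simp [PySem.Chars.splitOnMax.go, pvFirstSplit]
  | succ n ih =>
    intro l cur acc h
    cases l with
    | nil => simp [PySem.Chars.splitOnMax.go, pvFirstSplit]
    | cons c rest =>
      have hlen : rest.length ≤ n := by simpa using h
      by_cases hc : c = ' '
      · subst hc
        simp [PySem.Chars.splitOnMax.go, pvFirstSplit, List.isPrefixOf]
        rw [pvGo0 n rest [] _ hlen]
        simp
      · have hc2 : ¬ (' ' = c) := fun hh => hc hh.symm
        simp only [PySem.Chars.splitOnMax.go, pvFirstSplit]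
        rw [ih rest (c :: cur) acc hlen]
        cases hfs : pvFirstSplit rest with
        | none => simp [hc, hc2, List.isPrefixOf]
        | some pr => cases pr; simp [hc, hc2, List.isPrefixOf]

-- a single-space maxsplit-1 split is [before, after] at the first space, or [row] if there is none
theorem pvSplitMax1 (l : List Char) : PySem.Chars.splitOnMax l [' '] 1 =
    (match pvFirstSplit l with
     | none => [l]
     | some (p, r) => [p, r]) := by
  have h := pvGo1 (l.length + 1) l [] [] (by omega)
  simp only [PySem.Chars.splitOnMax]
  rw [if_neg (by norm_num)]
  have h1 : (1 : Int).toNat = 1 := rfl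
  rw [h1, h]
  cases hfs : pvFirstSplit l with
  | none => simp
  | some pr => cases pr; simp

theorem pvSplitMax1_two_lt (row v o : List Char) (h : PySem.Chars.splitOnMax row [' '] 1 = [v, o]) :
    o.length < row.length := by
  rw [pvSplitMax1] at h
  cases hfs : pvFirstSplit row with
  | none => simp [hfs] at h
  | some pr =>
    cases pr with
    | mk p r =>
      rw [hfs] at h
      simp only [List.cons.injEq, and_true] at h
      obtain ⟨hv, ho⟩ := h
      subst ho
      exact pvFirstSplit_length row p r hfs

-- ===== PORT A =====
-- def row_parse(values, row): literal transliteration; a Python ValueError (unpacking a split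
-- that did not produce two pieces) is `none`.
def rowParseA (values : List String) (row : List Char) : Option (List String) :=
  if values.length = 7 then some (values ++ [String.ofList row])
  else
    match h : PySem.Chars.splitOnMax row [' '] 1 with
    | [val, o_val] =>
        -- if val: values.append(val); row_parse(values, o_val)
        rowParseA (if val ≠ [] then values ++ [String.ofList val] else values) o_val
    | _ => none
  termination_by row.length
  decreasing_by exact pvSplitMax1_two_lt row val o_val h

-- the for-loop body over the lines; the counter c that skips the first line is the `.drop 1` in `process`
def pvLinesA : List String → Option (List (List (String × String)))
  | [] => some []
  | content :: rest =>
    if content = "" then pvLinesA rest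
    else
      match rowParseA [] content.toList with
      | none => none
      | some values =>
        -- dict(zip(fields, values)): the 8 field names are distinct fresh keys, so the dict's
        -- items in insertion order are exactly the zip of the two lists
        match pvLinesA rest with
        | none => none
        | some proc => some ((["user","pid","ppid","c","stime","tty","time","cmd"].zip values) :: proc)

def process (cmd_stdout : Option String) : Option (List (List (String × String))) :=
  match cmd_stdout with
  | none => none                                  -- if not cmd_stdout: return None
  | some s =>
    if s = "" then none
    else pvLinesA (((PySem.Str.split? s "\n").getD []).drop 1)

-- ===== PORT B =====
-- the while-loop of _row: the index i into parts is represented by the not-yet-consumed suffix ps;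
-- parts[i] on an exhausted list (Python IndexError) is `none`
def pvCollectB (ps : List (List Char)) (values : List String) : Option (List String × List (List Char)) :=
  if values.length = 7 then some (values, ps)
  else
    match ps with
    | [] => none
    | p :: rest => pvCollectB rest (if p ≠ [] then values ++ [String.ofList p] else values)
  termination_by structural ps

def pvRowB (line : List Char) : Option (List String) :=
  (pvCollectB (PySem.Chars.splitOn line [' ']) []).map
    (fun vr => vr.1 ++ [String.ofList (PySem.Chars.join [' '] vr.2)])

def process_alt (cmd_stdout : Option String) : Option (List (List (String × String))) :=
  match cmd_stdout with
  | none => none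
  | some s =>
    if s = "" then none
    else
      -- [dict(zip(fields, _row(line))) for line in cmd_stdout.split('\n')[1:] if line]
      ((((PySem.Str.split? s "\n").getD []).drop 1).filter (fun l => decide (l ≠ ""))).mapM
        (fun l => (pvRowB l.toList).map
          (fun values => ["user","pid","ppid","c","stime","tty","time","cmd"].zip values))

-- ===== PRECONDITION & SPEC =====
-- pvTokOK n ps: the token list of a line has at least n non-empty single-space tokens AND some part
-- follows the n-th of them (i.e. a space occurs after it) — the shape on which row_parse returns
def pvTokOK : Nat → List (List Char) → Bool
  | _, [] => false
  | n, p :: rest =>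
    if p = [] then pvTokOK n rest
    else if n ≤ 1 then decide (rest ≠ []) else pvTokOK (n - 1) rest

-- Pre_ excludes exactly the inputs on which A raises: some non-empty data line lacks 7 single-space
-- tokens, or nothing follows its 7th token, making the two-way unpacking of its maxsplit-1 split a ValueError.
def Pre_process (cmd_stdout : Option String) : Prop :=
  ∀ s ∈ cmd_stdout.toList,
    s = "" ∨ ∀ l ∈ (((PySem.Str.split? s "\n").getD []).drop 1), l ≠ "" →
      pvTokOK 7 (PySem.Chars.splitOn l.toList [' ']) = true
instance (cmd_stdout : Option String) : Decidable (Pre_process cmd_stdout) := by unfold Pre_process; infer_instance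

def pvWitness_process : Option String := some "UID PID PPID C STIME TTY TIME CMD\nroot 1 0 0 04:27 ? 00:00:05 /usr/bin/x --y\n"

def Spec_process (cmd_stdout : Option String) (out : Option (List (List (String × String)))) : Prop := out = process_alt cmd_stdout
instance (cmd_stdout : Option String) (out : Option (List (List (String × String)))) : Decidable (Spec_process cmd_stdout out) := by unfold Spec_process; infer_instance

-- ===== CLAIM (what is proved, stated in full; the proofs are below) =====
def Claim_equal_process : Prop := ∀ (cmd_stdout : Option String), Dom_process cmd_stdout → Pre_process cmd_stdout → Spec_process cmd_stdout (process cmd_stdout)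
-- ===== LEMMAS AND PROOFS =====
-- clean structural model of a single-space split of a line
def pvSplitSp : List Char → List (List Char)
  | [] => [[]]
  | c :: rest => if c = ' ' then [] :: pvSplitSp rest else (pvSplitSp rest).modifyHead (c :: ·)

theorem pvSplitSp_ne_nil (l : List Char) : pvSplitSp l ≠ [] := by
  cases l with
  | nil => simp [pvSplitSp]
  | cons c rest =>
    simp only [pvSplitSp]
    split
    · simp
    · cases h : pvSplitSp rest with
      | nil => exact absurd h (pvSplitSp_ne_nil rest)
      | cons a t => simp

theorem pvGoS : ∀ (fuel : Nat) (l cur : List Char) (acc : List (List Char)), l.length ≤ fuel →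
    PySem.Chars.splitOn.go [' '] fuel l cur acc =
      acc.reverse ++ (pvSplitSp l).modifyHead (cur.reverse ++ ·) := by
  intro fuel
  induction fuel with
  | zero => intro l cur acc h; simp at h; subst h; simp [PySem.Chars.splitOn.go, pvSplitSp]
  | succ n ih =>
    intro l cur acc h
    cases l with
    | nil => simp [PySem.Chars.splitOn.go, pvSplitSp]
    | cons c rest =>
      have hlen : rest.length ≤ n := by simpa using h
      by_cases hc : c = ' '
      · subst hc
        simp only [PySem.Chars.splitOn.go, pvSplitSp, List.isPrefixOf]
        rw [if_pos (by simp)]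
        simp only [List.length_cons, List.length_nil, List.drop_succ_cons, List.drop_zero]
        rw [ih rest [] _ hlen]
        cases hsp : pvSplitSp rest <;> simp
      · have hc2 : ¬ (' ' = c) := fun hh => hc hh.symm
        simp only [PySem.Chars.splitOn.go, pvSplitSp]
        rw [if_neg (by simp [List.isPrefixOf, hc2]), ih rest (c :: cur) acc hlen]
        cases hsp : pvSplitSp rest with
        | nil => exact absurd hsp (pvSplitSp_ne_nil rest)
        | cons a t => simp [hc]

theorem pvSplitOn_sp (l : List Char) : PySem.Chars.splitOn l [' '] = pvSplitSp l := by
  have h := pvGoS (l.length + 1) l [] [] (by omega)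
  simp only [PySem.Chars.splitOn] at h ⊢
  rw [h]
  cases hsp : pvSplitSp l with
  | nil => exact absurd hsp (pvSplitSp_ne_nil l)
  | cons a t => simp

theorem pvJoin_sp (l : List Char) : PySem.Chars.join [' '] (pvSplitSp l) = l := by
  induction l with
  | nil => simp [pvSplitSp, PySem.Chars.join_singleton]
  | cons c rest ih =>
    simp only [pvSplitSp]
    by_cases hc : c = ' '
    · subst hc
      rw [if_pos rfl]
      cases hsp : pvSplitSp rest with
      | nil => exact absurd hsp (pvSplitSp_ne_nil rest)
      | cons a t =>
        rw [hsp] at ih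
        rw [PySem.Chars.join_cons_cons]
        simp [ih]
    · rw [if_neg hc]
      cases hsp : pvSplitSp rest with
      | nil => exact absurd hsp (pvSplitSp_ne_nil rest)
      | cons a t =>
        rw [hsp] at ih
        cases t with
        | nil =>
          rw [PySem.Chars.join_singleton] at ih
          simp [PySem.Chars.join_singleton, ih]
        | cons b t' =>
          rw [PySem.Chars.join_cons_cons] at ih
          simp only [List.modifyHead]
          rw [PySem.Chars.join_cons_cons]
          simp [← ih]

theorem pvSp_first (l : List Char) : pvSplitSp l =
    (match pvFirstSplit l with
     | none => [l]
     | some (p, r) => p :: pvSplitSp r) := by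
  induction l with
  | nil => simp [pvSplitSp, pvFirstSplit]
  | cons c rest ih =>
    by_cases hc : c = ' '
    · subst hc; simp [pvSplitSp, pvFirstSplit]
    · simp only [pvSplitSp, pvFirstSplit, if_neg hc]
      cases hfs : pvFirstSplit rest with
      | none =>
        rw [hfs] at ih
        simp only [Option.map_none]
        rw [ih]
        simp
      | some pr =>
        cases pr with
        | mk a b =>
          rw [hfs] at ih
          rw [ih]
          simp

theorem pvCollectB_eq (ps : List (List Char)) (values : List String) :
    pvCollectB ps values =
      if values.length = 7 then some (values, ps)
      else
        match ps with
        | [] => none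
        | p :: rest => pvCollectB rest (if p ≠ [] then values ++ [String.ofList p] else values) := by
  rw [pvCollectB.eq_def]

theorem pvTokOK_single (n : Nat) (p : List Char) : pvTokOK n [p] = false := by
  by_cases hp : p = []
  · subst hp; simp [pvTokOK]
  · simp only [pvTokOK, if_neg hp]
    split
    · simp
    · simp [pvTokOK]

theorem pvMain : ∀ (n : Nat) (row : List Char) (values : List String), row.length ≤ n →
    values.length ≤ 7 →
    (values.length ≠ 7 → pvTokOK (7 - values.length) (pvSplitSp row) = true) →
    rowParseA values row =
      (pvCollectB (pvSplitSp row) values).map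
        (fun vr => vr.1 ++ [String.ofList (PySem.Chars.join [' '] vr.2)]) := by
  intro n
  induction n with
  | zero =>
    intro row values hn h7 htok
    by_cases he : values.length = 7
    · rw [rowParseA, pvCollectB_eq]
      simp [he, pvJoin_sp]
    · have hrow : row = [] := by simpa using hn
      subst hrow
      have h := htok he
      simp [pvSplitSp, pvTokOK] at h
  | succ m ih =>
    intro row values hn h7 htok
    by_cases he : values.length = 7
    · rw [rowParseA, pvCollectB_eq]
      simp [he, pvJoin_sp]
    · rw [rowParseA]
      rw [if_neg he, pvCollectB_eq, if_neg he]
      have htok' := htok he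
      cases hfs : pvFirstSplit row with
      | none =>
        have hsp : pvSplitSp row = [row] := by rw [pvSp_first, hfs]
        rw [hsp] at htok'
        rw [pvTokOK_single] at htok'
        exact absurd htok' (by simp)
      | some pr =>
        cases pr with
        | mk p r =>
          have hsp : pvSplitSp row = p :: pvSplitSp r := by rw [pvSp_first, hfs]
          have hlt : r.length < row.length := pvFirstSplit_length row p r hfs
          rw [pvSplitMax1, hfs, hsp]
          by_cases hp : p = []
          · subst hp
            simp only [ne_eq, not_true_eq_false, if_false]
            rw [ih r values (by omega) h7 ?_]
            intro hne
            have := htok hne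
            rw [hsp] at this
            simpa using this
          · simp only [ne_eq, hp, not_false_eq_true, if_true]
            rw [ih r (values ++ [String.ofList p]) (by omega) (by simp; omega) ?_]
            intro hne
            simp at hne
            rw [hsp] at htok'
            rw [pvTokOK, if_neg hp] at htok'
            rw [if_neg (by omega)] at htok'
            simpa [Nat.sub_sub] using htok'

theorem pvRow_eq (line : List Char) (h : pvTokOK 7 (PySem.Chars.splitOn line [' ']) = true) :
    rowParseA [] line = pvRowB line := by
  rw [pvRowB, pvSplitOn_sp]
  rw [pvSplitOn_sp] at h
  exact pvMain line.length line [] le_rfl (by simp) (fun _ => h)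

theorem pvOuter : ∀ (ls : List String),
    (∀ l ∈ ls, l ≠ "" → pvTokOK 7 (PySem.Chars.splitOn l.toList [' ']) = true) →
    pvLinesA ls = (ls.filter (fun l => decide (l ≠ ""))).mapM
      (fun l => (pvRowB l.toList).map
        (fun values => ["user","pid","ppid","c","stime","tty","time","cmd"].zip values)) := by
  intro ls
  induction ls with
  | nil => intro _; simp [pvLinesA]
  | cons content rest ih =>
    intro hall
    have hrest := fun l hl => hall l (List.mem_cons_of_mem _ hl)
    by_cases hc : content = ""
    · subst hc
      have hfil : List.filter (fun l => decide (l ≠ "")) ("" :: rest) =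
          List.filter (fun l => decide (l ≠ "")) rest := by simp
      have hlin : pvLinesA ("" :: rest) = pvLinesA rest := by
        simp [pvLinesA]
      rw [hfil, hlin]
      exact ih hrest
    · have hline := pvRow_eq content.toList (hall content (by simp) hc)
      have hfil : List.filter (fun l => decide (l ≠ "")) (content :: rest) =
          content :: List.filter (fun l => decide (l ≠ "")) rest := by
        simp [hc]
      simp only [pvLinesA]
      rw [if_neg hc, hfil]
      rw [List.mapM_cons, hline]
      cases hrow : pvRowB content.toList with
      | none => simp
      | some values =>
        simp only [Option.map_some]
        rw [ih hrest]
        cases hm : (rest.filter (fun l => decide (l ≠ ""))).mapM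
            (fun l => (pvRowB l.toList).map
              (fun values => ["user","pid","ppid","c","stime","tty","time","cmd"].zip values)) with
        | none => simp
        | some proc => simp


-- ===== VERDICT (by name: the statement is the Claim_ definition above) =====
theorem process_spec : Claim_equal_process := by
  intro cmd_stdout _ hpre
  unfold Spec_process
  cases cmd_stdout with
  | none => rfl
  | some s =>
    by_cases hs : s = ""
    · simp [process, process_alt, hs]
    · have h := hpre s (by simp)
      cases h with
      | inl h0 => exact absurd h0 hs
      | inr hall =>
        simp only [process, process_alt, if_neg hs]
        exact pvOuter _ hall
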